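-- pv_equiv track=rewrite | github.com/roughentomologyx/hcmask.py | hcmask2wordlist.py | parse_mask
-- ===== SOURCE A (Python) =====
-- mask_elements = {
--     '?d': '0123456789',
--     '?l': 'abcdefghijklmnopqrstuvwxyz',
--     '?u': 'ABCDEFGHIJKLMNOPQRSTUVWXYZ',
--     '?s': ' !"#$%&\'()*+,-./:;<=>?@[\\]^_`{|}~',
--     '?h': '0123456789abcdef',
--     '?H': '0123456789ABCDEF'
-- }
--
-- def parse_mask(mask):
--     """Parse the hashcat mask into its component character sets."""
--     parts = []
--     i = 0
--     while i < len(mask):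
--         if mask[i] == '?':
--             parts.append(mask_elements[mask[i:i+2]])
--             i += 2
--         else:
--             parts.append(mask[i])
--             i += 1
--     return parts
-- ===== SOURCE B (Python) =====
-- mask_elements = {
--     '?d': '0123456789',
--     '?l': 'abcdefghijklmnopqrstuvwxyz',
--     '?u': 'ABCDEFGHIJKLMNOPQRSTUVWXYZ',
--     '?s': ' !"#$%&\'()*+,-./:;<=>?@[\\]^_`{|}~',
--     '?h': '0123456789abcdef',
--     '?H': '0123456789ABCDEF'
-- }
--
-- def parse_mask(mask):
--     """Parse the hashcat mask by splitting on '?' instead of scanning by index."""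
--     chunks = mask.split('?')
--     parts = list(chunks[0])
--     for chunk in chunks[1:]:
--         parts.append(mask_elements['?' + chunk[0]])
--         parts.extend(chunk[1:])
--     return parts
-- ===== Notes on version B (the rewrite author's own statement) =====
-- stated objective: faster
-- what changed: B splits the mask on '?' once (str.split) and builds the result chunk by chunk — first chunk as literal chars, each later chunk as one set lookup on its head plus its literal tail — instead of A's per-character index-driven while loop with two-char slicing; the per-character work moves from Python bytecode into C-level split/list/extend.
import Mathlib
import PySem

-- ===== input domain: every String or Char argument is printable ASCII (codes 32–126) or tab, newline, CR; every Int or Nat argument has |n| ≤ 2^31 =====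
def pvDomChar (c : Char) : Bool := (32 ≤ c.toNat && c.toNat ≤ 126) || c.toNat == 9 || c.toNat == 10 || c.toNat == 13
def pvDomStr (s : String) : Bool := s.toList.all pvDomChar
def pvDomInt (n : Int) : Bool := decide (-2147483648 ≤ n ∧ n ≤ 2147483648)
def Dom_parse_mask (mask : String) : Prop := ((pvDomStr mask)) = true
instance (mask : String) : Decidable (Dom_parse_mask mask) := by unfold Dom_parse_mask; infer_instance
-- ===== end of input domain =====

-- B splits the mask on '?' once and maps each chunk, instead of A's index-driven while loop; measurably faster by a constant factor (C-level split/extend).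

-- ===== PORT A =====
-- the module-level dict mask_elements, keyed by the two-char '?x' token
def maskElements : PySem.Dict (List Char) String :=
  PySem.Dict.ofList
    [ (['?','d'], "0123456789")
    , (['?','l'], "abcdefghijklmnopqrstuvwxyz")
    , (['?','u'], "ABCDEFGHIJKLMNOPQRSTUVWXYZ")
    , (['?','s'], " !\"#$%&'()*+,-./:;<=>?@[\\]^_`{|}~")
    , (['?','h'], "0123456789abcdef")
    , (['?','H'], "0123456789ABCDEF") ]

-- A's while loop over the index i; mask_elements[mask[i:i+2]] raising KeyError is the
-- get? = none branch, which lies outside Pre_parse_mask (the loop just stops there)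
def parseMaskLoop (s : List Char) (i : Nat) (parts : List String) : List String :=
  if h : i < s.length then
    if s[i] = '?' then
      match maskElements.get? (PySem.List.slice s (some (i : Int)) (some ((i : Int) + 2))) with
      | some v => parseMaskLoop s (i + 2) (parts ++ [v])
      | none => parts
    else
      parseMaskLoop s (i + 1) (parts ++ [String.ofList [s[i]]])
  else parts
termination_by s.length - i

def parse_mask (mask : String) : List String :=
  parseMaskLoop mask.toList 0 []

-- ===== PORT B =====
def litStr (ch : Char) : String := String.ofList [ch]

-- the body of B's for loop: one chunk (text between two '?') extends parts;
-- the empty-chunk / unknown-key cases are B's IndexError/KeyError, outside Pre_parse_mask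
def chunkStep (parts : List String) (chunk : List Char) : List String :=
  match chunk with
  | [] => parts
  | d :: tail =>
    match maskElements.get? ['?', d] with
    | some v => (parts ++ [v]) ++ tail.map litStr
    | none => parts

def parse_mask_alt (mask : String) : List String :=
  match PySem.Chars.splitOn mask.toList ['?'] with
  | [] => []
  | c0 :: rest => rest.foldl chunkStep (c0.map litStr)

-- ===== PRECONDITION & SPEC =====
def isSetChar (c : Char) : Bool :=
  c = 'd' || c = 'l' || c = 'u' || c = 's' || c = 'h' || c = 'H'

-- "every '?' in the mask is immediately followed by one of d,l,u,s,h,H"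
def okPairs : List Char → Bool
  | [] => true
  | a :: rest =>
    (a != '?' || (match rest with | [] => false | b :: _ => isSetChar b)) && okPairs rest

-- Pre_ excludes exactly the masks on which A raises KeyError (a '?' not followed by a
-- known set letter, or a mask ending in '?'); B also raises (KeyError or IndexError) on exactly those masks.
def Pre_parse_mask (mask : String) : Prop := okPairs mask.toList = true
instance (mask : String) : Decidable (Pre_parse_mask mask) := by unfold Pre_parse_mask; infer_instance

def pvWitness_parse_mask : String := "pass?d?l-?u!"

def Spec_parse_mask (mask : String) (out : List String) : Prop := out = parse_mask_alt mask
instance (mask : String) (out : List String) : Decidable (Spec_parse_mask mask out) := by unfold Spec_parse_mask; infer_instance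

-- ===== CLAIM (what is proved, stated in full; the proofs are below) =====
def Claim_equal_parse_mask : Prop := ∀ (mask : String), Dom_parse_mask mask → Pre_parse_mask mask → Spec_parse_mask mask (parse_mask mask)

-- ===== LEMMAS AND PROOFS =====

-- the canonical token list both ports are shown to compute under Pre_
def setVal (c : Char) : String :=
  if c = 'd' then "0123456789"
  else if c = 'l' then "abcdefghijklmnopqrstuvwxyz"
  else if c = 'u' then "ABCDEFGHIJKLMNOPQRSTUVWXYZ"
  else if c = 's' then " !\"#$%&'()*+,-./:;<=>?@[\\]^_`{|}~"
  else if c = 'h' then "0123456789abcdef"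
  else "0123456789ABCDEF"

def tokensSpec (s : List Char) : List String :=
  match s with
  | [] => []
  | c :: rest =>
    if c = '?' then
      match rest with
      | [] => []
      | d :: r => setVal d :: tokensSpec r
    else String.ofList [c] :: tokensSpec rest

lemma get?_setChar (c : Char) (h : isSetChar c = true) :
    maskElements.get? ['?', c] = some (setVal c) := by
  simp [isSetChar, decide_eq_true_eq] at h
  rcases h with ((((h | h) | h) | h) | h) | h <;> subst h <;> decide

lemma setChar_ne (c : Char) (h : isSetChar c = true) : c ≠ '?' := by
  simp [isSetChar, decide_eq_true_eq] at h
  rcases h with ((((h | h) | h) | h) | h) | h <;> subst h <;> decide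

-- A's loop, at index i with a valid remainder, appends exactly the canonical tokens
lemma loopA (s : List Char) (i : Nat) (parts : List String) :
    okPairs (s.drop i) = true →
    parseMaskLoop s i parts = parts ++ tokensSpec (s.drop i) := by
  fun_induction parseMaskLoop s i parts with
  | case1 i parts hlt hq v hget ih =>
    intro hok
    have hdrop : s.drop i = s[i] :: s.drop (i+1) := List.drop_eq_getElem_cons hlt
    rw [hdrop] at hok
    simp only [okPairs, hq, bne_self_eq_false, Bool.false_or, Bool.and_eq_true] at hok
    obtain ⟨hhead, htail⟩ := hok
    cases h2 : s.drop (i+1) with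
    | nil => rw [h2] at hhead; simp at hhead
    | cons d r =>
      rw [h2] at hhead htail
      have hd : isSetChar d = true := by simpa using hhead
      have hlen : i + 1 < s.length := by
        by_contra hge
        have : s.drop (i+1) = [] := List.drop_eq_nil_of_le (by omega)
        rw [this] at h2; cases h2
      have hdrop2 : s.drop (i+1) = s[i+1] :: s.drop (i+2) := List.drop_eq_getElem_cons hlen
      rw [hdrop2] at h2
      injection h2 with hdv hr
      have hslice : PySem.List.slice s (some (i : Int)) (some ((i : Int) + 2)) = ['?', d] := by
        have h4 : ((i : Int) + 2) = ((i + 2 : Nat) : Int) := by push_cast; ring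
        rw [h4, PySem.List.slice_natCast]
        have h3 : i + 2 - i = 2 := by omega
        rw [h3, hdrop, hdrop2]
        simp [List.take, hq, hdv]
      rw [hslice, get?_setChar d hd] at hget
      have hv : v = setVal d := by injection hget with h; exact h.symm
      have hok2 : okPairs (s.drop (i+2)) = true := by
        rw [hr]
        simp only [okPairs, Bool.and_eq_true] at htail
        exact htail.2
      rw [ih hok2, hv, hdrop, hdrop2, hdv]
      simp [tokensSpec, hq]
  | case2 i parts hlt hq hget =>
    intro hok
    -- the KeyError branch: contradicts okPairs
    exfalso
    have hdrop : s.drop i = s[i] :: s.drop (i+1) := List.drop_eq_getElem_cons hlt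
    rw [hdrop] at hok
    simp only [okPairs, hq, bne_self_eq_false, Bool.false_or, Bool.and_eq_true] at hok
    obtain ⟨hhead, htail⟩ := hok
    cases h2 : s.drop (i+1) with
    | nil => rw [h2] at hhead; simp at hhead
    | cons d r =>
      rw [h2] at hhead
      have hd : isSetChar d = true := by simpa using hhead
      have hlen : i + 1 < s.length := by
        by_contra hge
        have : s.drop (i+1) = [] := List.drop_eq_nil_of_le (by omega)
        rw [this] at h2; cases h2
      have hdrop2 : s.drop (i+1) = s[i+1] :: s.drop (i+2) := List.drop_eq_getElem_cons hlen
      rw [hdrop2] at h2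
      injection h2 with hdv hr
      have hslice : PySem.List.slice s (some (i : Int)) (some ((i : Int) + 2)) = ['?', d] := by
        have h4 : ((i : Int) + 2) = ((i + 2 : Nat) : Int) := by push_cast; ring
        rw [h4, PySem.List.slice_natCast]
        have h3 : i + 2 - i = 2 := by omega
        rw [h3, hdrop, hdrop2]
        simp [List.take, hq, hdv]
      rw [hslice, get?_setChar d hd] at hget
      cases hget
  | case3 i parts hlt hq ih =>
    intro hok
    have hdrop : s.drop i = s[i] :: s.drop (i+1) := List.drop_eq_getElem_cons hlt
    rw [hdrop] at hok
    simp only [okPairs, Bool.and_eq_true] at hok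
    rw [ih hok.2]
    have htok : tokensSpec (s.drop i) = String.ofList [s[i]] :: tokensSpec (s.drop (i+1)) := by
      rw [hdrop, tokensSpec.eq_def]
      simp [hq]
    rw [htok]
    simp
  | case4 i parts hlt =>
    intro hok
    have : s.drop i = [] := List.drop_eq_nil_of_le (by omega)
    simp [this, tokensSpec]

-- proof-side mirror of str.split('?') (single-char separator, explicit accumulator)
def splitQ : List Char → List Char → List (List Char)
  | [], cur => [cur.reverse]
  | c :: rest, cur => if c = '?' then cur.reverse :: splitQ rest [] else splitQ rest (c :: cur)

def firstLit : List Char → List Char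
  | [] => []
  | c :: t => if c = '?' then [] else c :: firstLit t

def restChunks : List Char → List (List Char)
  | [] => []
  | c :: t => if c = '?' then splitQ t [] else restChunks t

lemma splitQ_acc (s : List Char) : ∀ cur,
    splitQ s cur = (cur.reverse ++ firstLit s) :: restChunks s := by
  induction s with
  | nil => intro cur; simp [splitQ, firstLit, restChunks]
  | cons c t ih =>
    intro cur
    by_cases hc : c = '?'
    · simp [splitQ, firstLit, restChunks, hc]
    · simp [splitQ, firstLit, restChunks, hc, ih (c :: cur)]

lemma go_eq (fuel : Nat) : ∀ (l cur : List Char) (acc : List (List Char)),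
    l.length < fuel →
    PySem.Chars.splitOn.go ['?'] fuel l cur acc = acc.reverse ++ splitQ l cur := by
  induction fuel with
  | zero => intro l cur acc h; omega
  | succ n ih =>
    intro l cur acc h
    cases l with
    | nil => simp [PySem.Chars.splitOn.go, splitQ]
    | cons c rest =>
      by_cases hc : c = '?'
      · subst hc
        rw [PySem.Chars.splitOn.go]
        simp only [List.isPrefixOf, BEq.rfl, Bool.true_and]
        rw [ih _ _ _ (by simpa using Nat.lt_of_succ_lt_succ h)]
        simp [splitQ]
      · rw [PySem.Chars.splitOn.go]
        have hnp : ¬ (List.isPrefixOf ['?'] (c :: rest) = true) := by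
          simp [List.isPrefixOf]; exact fun hh => hc (by simpa using hh.symm)
        simp only [hnp, if_false, splitQ, hc]
        exact ih _ _ _ (by simp at h; omega)

lemma splitOn_eq_splitQ (s : List Char) :
    PySem.Chars.splitOn s ['?'] = splitQ s [] := by
  have := go_eq (s.length + 1) s [] [] (by omega)
  simpa [PySem.Chars.splitOn] using this

def chunkF : List Char → List String
  | [] => []
  | d :: tail =>
    match maskElements.get? ['?', d] with
    | some v => v :: tail.map litStr
    | none => []

lemma chunkStep_eq (parts : List String) (c : List Char) :
    chunkStep parts c = parts ++ chunkF c := by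
  cases c with
  | nil => simp [chunkStep, chunkF]
  | cons d tail =>
    cases h : maskElements.get? ['?', d] <;> simp [chunkStep, chunkF, h]

lemma foldl_chunkStep (chunks : List (List Char)) : ∀ parts,
    chunks.foldl chunkStep parts = parts ++ chunks.flatMap chunkF := by
  induction chunks with
  | nil => intro parts; simp
  | cons c cs ih => intro parts; simp [List.foldl_cons, chunkStep_eq, ih, List.flatMap_cons]

-- B's chunk decomposition of a valid mask rebuilds exactly the canonical tokens
lemma B_main (s : List Char) (h : okPairs s = true) :
    (firstLit s).map litStr ++ (restChunks s).flatMap chunkF = tokensSpec s := by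
  fun_induction tokensSpec s with
  | case1 => simp [firstLit, restChunks]
  | case2 =>
    -- s = ['?'] : contradicts okPairs
    simp [okPairs] at h
  | case3 d r ih =>
    simp only [okPairs, bne_self_eq_false, Bool.false_or, Bool.and_eq_true] at h
    have hd : isSetChar d = true := by simpa using h.1
    have hdq : d ≠ '?' := setChar_ne d hd
    have hokr : okPairs r = true := h.2.2
    have h1 : firstLit ('?' :: d :: r) = [] := by simp [firstLit]
    have h2 : restChunks ('?' :: d :: r) = splitQ (d :: r) [] := by simp [restChunks]
    have h3 : splitQ (d :: r) [] = splitQ r [d] := by simp [splitQ, hdq]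
    have h4 : chunkF (d :: firstLit r) = setVal d :: (firstLit r).map litStr := by
      simp [chunkF, get?_setChar d hd]
    rw [h1, h2, h3, splitQ_acc r [d]]
    simp only [List.map_nil, List.nil_append, List.flatMap_cons, List.reverse_cons,
      List.reverse_nil, List.singleton_append, h4]
    simp [ih hokr]
  | case4 c rest hc ih =>
    simp only [firstLit, restChunks, if_neg hc, List.map_cons, List.cons_append]
    rw [ih (by simp only [okPairs, Bool.and_eq_true] at h; exact h.2)]
    rfl

-- ===== VERDICT (by name: the statement is the Claim_ definition above) =====
theorem parse_mask_spec : Claim_equal_parse_mask := by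
  intro mask _hdom hpre
  unfold Spec_parse_mask parse_mask parse_mask_alt
  rw [splitOn_eq_splitQ, splitQ_acc _ []]
  simp only [List.reverse_nil, List.nil_append]
  rw [foldl_chunkStep, loopA mask.toList 0 [] (by simpa using hpre), B_main mask.toList hpre]
  simp
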